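-- pv_equiv track=rewrite | github.com/BJV-git/leetcode | math/sum_of_squares.py | ifsq
-- ===== SOURCE A (Python) =====
-- def ifsq(n):
--
--     seen = set()
--     i=1
--     while i**2 <n :
--         target = n - (i**2)
--         if target in seen:
--             return True
--         seen.add(i**2)
--         i+=1
--     return False
-- ===== SOURCE B (Python) =====
-- def ifsq(n):
--     # two-pointer search over 1 <= a < b <= isqrt(n); O(1) extra space
--     if n < 1:
--         return False
--     b = 1
--     while b * b < n:
--         b += 1
--     if b * b > n:
--         b -= 1
--     a = 1
--     while a < b:
--         s = a * a + b * b
--         if s == n: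
--             return True
--         if s < n:
--             a += 1
--         else:
--             b -= 1
--     return False
-- ===== Notes on version B (the rewrite author's own statement) =====
-- stated objective: alternative
-- what changed: Replaced A's growing set of seen squares (hash set, one membership test per square) with a two-pointer scan a=1..b=isqrt(n) moving inward, using O(1) extra space and no set at all.
import Mathlib
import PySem

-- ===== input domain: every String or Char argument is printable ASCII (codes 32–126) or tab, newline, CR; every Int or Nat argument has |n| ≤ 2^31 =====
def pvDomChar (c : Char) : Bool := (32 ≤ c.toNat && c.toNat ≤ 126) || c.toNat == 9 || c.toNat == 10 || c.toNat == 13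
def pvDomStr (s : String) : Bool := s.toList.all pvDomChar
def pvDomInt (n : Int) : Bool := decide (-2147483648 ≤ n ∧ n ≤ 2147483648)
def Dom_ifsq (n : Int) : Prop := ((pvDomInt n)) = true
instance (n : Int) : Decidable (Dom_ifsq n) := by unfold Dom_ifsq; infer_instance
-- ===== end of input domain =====

-- B replaces A's growing set of seen squares by a two-pointer scan (a up from 1, b down from isqrt(n)); O(1) extra space, same asymptotic time.

-- ===== PORT A =====
-- while i**2 < n: check n - i**2 in seen, add i**2, i += 1
def ifsqGo (n : Int) (seen : PySem.Set Int) (i : Nat) : Bool :=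
  if _h : (i : Int) * i < n then
    if PySem.Set.contains seen (n - (i : Int) * i) then true
    else ifsqGo n (PySem.Set.add seen ((i : Int) * i)) (i + 1)
  else false
termination_by (n - (i : Int) * i).toNat
decreasing_by
  have h1 : ((i + 1 : Nat) : Int) * ((i + 1 : Nat) : Int) = (i : Int) * i + 2 * i + 1 := by
    push_cast; ring
  have h2 : (0 : Int) ≤ (i : Int) := Int.natCast_nonneg i
  omega

def ifsq (n : Int) : Bool := ifsqGo n PySem.Set.empty 1

-- ===== PORT B =====
-- while b*b < n: b += 1
def ifsqUp (n : Int) (b : Nat) : Nat :=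
  if (b : Int) * b < n then ifsqUp n (b + 1) else b
termination_by (n - (b : Int) * b).toNat
decreasing_by
  have h1 : ((b + 1 : Nat) : Int) * ((b + 1 : Nat) : Int) = (b : Int) * b + 2 * b + 1 := by
    push_cast; ring
  have h2 : (0 : Int) ≤ (b : Int) := Int.natCast_nonneg b
  omega

-- while a < b: s = a*a + b*b; if s == n return True; if s < n: a += 1 else b -= 1
def ifsqTwoPtr (n : Int) (a b : Nat) : Bool :=
  if _h : a < b then
    let s := (a : Int) * a + (b : Int) * b
    if s = n then true
    else if s < n then ifsqTwoPtr n (a + 1) b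
    else ifsqTwoPtr n a (b - 1)
  else false
termination_by b - a
decreasing_by all_goals omega

def ifsq_alt (n : Int) : Bool :=
  if n < 1 then false
  else
    let b0 := ifsqUp n 1
    let b1 := if (b0 : Int) * b0 > n then b0 - 1 else b0
    ifsqTwoPtr n 1 b1

-- ===== PRECONDITION & SPEC =====
def Spec_ifsq (n : Int) (out : Bool) : Prop := out = ifsq_alt n
instance (n : Int) (out : Bool) : Decidable (Spec_ifsq n out) := by unfold Spec_ifsq; infer_instance

-- ===== CLAIM (what is proved, stated in full; the proofs are below) =====
def Claim_equal_ifsq : Prop := ∀ (n : Int), Dom_ifsq n → Spec_ifsq n (ifsq n)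

-- ===== LEMMAS AND PROOFS =====

-- n is a sum of two distinct positive squares
def GoodSq (n : Int) : Prop :=
  ∃ a b : Nat, 1 ≤ a ∧ a < b ∧ (a : Int) * a + (b : Int) * b = n

-- Nat square monotonicity helpers
theorem sq_lt_of_lt {x y : Nat} (h : x < y) : (x : Int) * x < (y : Int) * y := by
  have : x * x < y * y := Nat.mul_lt_mul_of_lt_of_le h (Nat.le_of_lt h) (by omega)
  exact_mod_cast this

theorem lt_of_sq_lt {x y : Nat} (h : (x : Int) * x < (y : Int) * y) : x < y := by
  by_contra hc
  have : (y : Int) * y ≤ (x : Int) * x := by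
    have : y ≤ x := Nat.le_of_not_lt hc
    exact_mod_cast Nat.mul_le_mul this this
  omega

-- the larger square of a good pair is below n
theorem good_b_sq_lt {n : Int} {a b : Nat} (ha : 1 ≤ a) (hab : a < b)
    (heq : (a : Int) * a + (b : Int) * b = n) : (b : Int) * b < n := by
  have h1 : (1 : Int) ≤ (a : Int) * a := by
    have : 1 * 1 ≤ a * a := Nat.mul_le_mul ha ha
    exact_mod_cast this
  omega

-- A's loop, with the seen set characterised as the squares 1..i-1
theorem ifsqGo_iff (n : Int) : ∀ (fuel i : Nat) (S : PySem.Set Int),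
    (n - (i : Int) * i).toNat < fuel → 1 ≤ i →
    (∀ x : Int, x ∈ S ↔ ∃ j : Nat, 1 ≤ j ∧ j < i ∧ x = (j : Int) * j) →
    (ifsqGo n S i = true ↔
      ∃ a b : Nat, 1 ≤ a ∧ a < b ∧ i ≤ b ∧ (a : Int) * a + (b : Int) * b = n) := by
  intro fuel
  induction fuel with
  | zero => intro i S hf; omega
  | succ f ih =>
    intro i S hf hi hS
    rw [ifsqGo]
    by_cases h : (i : Int) * i < n
    · simp only [h, dif_pos]
      by_cases hc : PySem.Set.contains S (n - (i : Int) * i) = true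
      · rw [if_pos hc]
        have hmem := (PySem.Set.contains_iff _ _).mp hc
        obtain ⟨j, hj1, hji, hjx⟩ := (hS _).mp hmem
        constructor
        · intro _
          exact ⟨j, i, hj1, hji, le_refl i, by omega⟩
        · intro _; rfl
      · rw [if_neg hc]
        have hS' : ∀ x : Int, x ∈ PySem.Set.add S ((i : Int) * i) ↔
            ∃ j : Nat, 1 ≤ j ∧ j < i + 1 ∧ x = (j : Int) * j := by
          intro x
          rw [PySem.Set.mem_add, hS]
          constructor
          · rintro (⟨j, hj1, hji, hx⟩ | hx)
            · exact ⟨j, hj1, by omega, hx⟩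
            · exact ⟨i, hi, by omega, hx⟩
          · rintro ⟨j, hj1, hji, hx⟩
            by_cases hji' : j < i
            · exact Or.inl ⟨j, hj1, hji', hx⟩
            · have : j = i := by omega
              exact Or.inr (by rw [hx, this])
        have hfuel : (n - ((i + 1 : Nat) : Int) * ((i + 1 : Nat) : Int)).toNat < f := by
          have h1 : ((i + 1 : Nat) : Int) * ((i + 1 : Nat) : Int) = (i : Int) * i + 2 * i + 1 := by
            push_cast; ring
          have h2 : (0 : Int) ≤ (i : Int) := Int.natCast_nonneg i
          omega
        rw [ih (i + 1) _ hfuel (by omega) hS']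
        constructor
        · rintro ⟨a, b, ha, hab, hib, heq⟩
          exact ⟨a, b, ha, hab, by omega, heq⟩
        · rintro ⟨a, b, ha, hab, hib, heq⟩
          refine ⟨a, b, ha, hab, ?_, heq⟩
          by_contra hb
          have hbi : b = i := by omega
          subst hbi
          have : (n - (b : Int) * b) ∈ S := by
            rw [hS]
            exact ⟨a, ha, hab, by omega⟩
          exact hc ((PySem.Set.contains_iff _ _).mpr this)
    · simp only [h, dif_neg, not_false_iff]
      constructor
      · intro hfalse; exact absurd hfalse (by simp)
      · rintro ⟨a, b, ha, hab, hib, heq⟩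
        have hlt : (b : Int) * b < n := good_b_sq_lt ha hab heq
        have : (i : Int) * i ≤ (b : Int) * b := by
          rcases Nat.eq_or_lt_of_le hib with h' | h'
          · rw [h']
          · exact le_of_lt (sq_lt_of_lt h')
        omega

theorem ifsq_iff_good (n : Int) : ifsq n = true ↔ GoodSq n := by
  unfold ifsq
  have hS : ∀ x : Int, x ∈ (PySem.Set.empty : PySem.Set Int) ↔
      ∃ j : Nat, 1 ≤ j ∧ j < 1 ∧ x = (j : Int) * j := by
    intro x
    constructor
    · intro hx; exact absurd hx (by simp [PySem.Set.empty])
    · rintro ⟨j, hj1, hj2, _⟩; omega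
  rw [ifsqGo_iff n ((n - 1).toNat + 1) 1 PySem.Set.empty (by push_cast; omega) (le_refl 1) hS]
  constructor
  · rintro ⟨a, b, ha, hab, _, heq⟩; exact ⟨a, b, ha, hab, heq⟩
  · rintro ⟨a, b, ha, hab, heq⟩; exact ⟨a, b, ha, hab, by omega, heq⟩

-- B's upward scan: result r ≥ b with r*r ≥ n and all j in [b, r) have j*j < n
theorem ifsqUp_spec (n : Int) : ∀ (fuel b : Nat), (n - (b : Int) * b).toNat < fuel →
    b ≤ ifsqUp n b ∧ n ≤ (ifsqUp n b : Int) * (ifsqUp n b) ∧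
      ∀ j : Nat, b ≤ j → j < ifsqUp n b → (j : Int) * j < n := by
  intro fuel
  induction fuel with
  | zero => intro b hf; omega
  | succ f ih =>
    intro b hf
    rw [ifsqUp]
    by_cases h : (b : Int) * b < n
    · rw [if_pos h]
      have hfuel : (n - ((b + 1 : Nat) : Int) * ((b + 1 : Nat) : Int)).toNat < f := by
        have h1 : ((b + 1 : Nat) : Int) * ((b + 1 : Nat) : Int) = (b : Int) * b + 2 * b + 1 := by
          push_cast; ring
        have h2 : (0 : Int) ≤ (b : Int) := Int.natCast_nonneg b
        omega
      obtain ⟨h1, h2, h3⟩ := ih (b + 1) hfuel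
      refine ⟨by omega, h2, ?_⟩
      intro j hbj hjr
      by_cases hj : j = b
      · subst hj; exact h
      · exact h3 j (by omega) hjr
    · rw [if_neg h]
      exact ⟨le_refl b, by omega, fun j h1 h2 => by omega⟩

-- B's two-pointer loop, with the invariant that every good pair lies in [a, b]
theorem ifsqTwoPtr_iff (n : Int) : ∀ (fuel a b : Nat), b - a < fuel → 1 ≤ a →
    (∀ x y : Nat, 1 ≤ x → x < y → (x : Int) * x + (y : Int) * y = n → a ≤ x ∧ y ≤ b) →
    (ifsqTwoPtr n a b = true ↔ GoodSq n) := by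
  intro fuel
  induction fuel with
  | zero => intro a b hf; omega
  | succ f ih =>
    intro a b hf ha hinv
    rw [ifsqTwoPtr]
    by_cases hab : a < b
    · simp only [hab, dif_pos]
      by_cases heq : (a : Int) * a + (b : Int) * b = n
      · rw [if_pos heq]
        constructor
        · intro _; exact ⟨a, b, ha, hab, heq⟩
        · intro _; rfl
      · rw [if_neg heq]
        by_cases hlt : (a : Int) * a + (b : Int) * b < n
        · rw [if_pos hlt]
          refine ih (a + 1) b (by omega) (by omega) ?_
          intro x y hx hxy hxyn
          obtain ⟨h1, h2⟩ := hinv x y hx hxy hxyn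
          refine ⟨?_, h2⟩
          by_cases hxa : x = a
          · subst hxa
            have : (b : Int) * b < (y : Int) * y := by omega
            have := lt_of_sq_lt this
            omega
          · omega
        · rw [if_neg hlt]
          refine ih a (b - 1) (by omega) ha ?_
          intro x y hx hxy hxyn
          obtain ⟨h1, h2⟩ := hinv x y hx hxy hxyn
          refine ⟨h1, ?_⟩
          by_cases hyb : y = b
          · subst hyb
            have : (x : Int) * x < (a : Int) * a := by omega
            have := lt_of_sq_lt this
            omega
          · omega
    · simp only [hab, dif_neg, not_false_iff]
      constructor
      · intro hfalse; exact absurd hfalse (by simp)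
      · rintro ⟨x, y, hx, hxy, hxyn⟩
        obtain ⟨h1, h2⟩ := hinv x y hx hxy hxyn
        omega

theorem ifsq_alt_iff_good (n : Int) : ifsq_alt n = true ↔ GoodSq n := by
  unfold ifsq_alt
  by_cases hn : n < 1
  · rw [if_pos hn]
    constructor
    · intro hfalse; exact absurd hfalse (by simp)
    · rintro ⟨a, b, ha, hab, heq⟩
      have h1 : (1 : Int) ≤ (a : Int) * a := by
        have : 1 * 1 ≤ a * a := Nat.mul_le_mul ha ha
        exact_mod_cast this
      have h2 : (0 : Int) ≤ (b : Int) * b := by positivity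
      omega
  · rw [if_neg hn]
    obtain ⟨hge, hsq, hbelow⟩ := ifsqUp_spec n ((n - 1).toNat + 1) 1 (by push_cast; omega)
    set r := ifsqUp n 1 with hr
    -- b1 := if r*r > n then r - 1 else r; every good pair's larger member is ≤ b1
    have hkey : ∀ x y : Nat, 1 ≤ x → x < y → (x : Int) * x + (y : Int) * y = n →
        1 ≤ x ∧ y ≤ (if (r : Int) * r > n then r - 1 else r) := by
      intro x y hx hxy hxyn
      have hylt : (y : Int) * y < n := good_b_sq_lt hx hxy hxyn
      refine ⟨hx, ?_⟩
      have hyr : y ≤ r := by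
        by_contra hc
        have := sq_lt_of_lt (show r < y by omega)
        omega
      by_cases hgt : (r : Int) * r > n
      · rw [if_pos hgt]
        by_contra hc
        have hyr' : y = r := by omega
        subst hyr'
        omega
      · rw [if_neg hgt]; exact hyr
    exact ifsqTwoPtr_iff n ((if (r : Int) * r > n then r - 1 else r) - 1 + 1) 1 _
      (by omega) (le_refl 1) (fun x y hx hxy hxyn => hkey x y hx hxy hxyn)

-- ===== VERDICT (by name: the statement is the Claim_ definition above) =====
theorem ifsq_spec : Claim_equal_ifsq := by
  intro n _
  unfold Spec_ifsq
  rw [Bool.eq_iff_iff, ifsq_iff_good, ifsq_alt_iff_good]
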